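-- pv_equiv track=rewrite | github.com/edgarmoya/codesignal-solutions | Problem 16/Problem 16 - AreSimilar.py | solution
-- ===== SOURCE A (Python) =====
-- def solution(a, b):
--     change = -1
--     count = 0
--     for i in range(len(a)):
--         if a[i] != b[i] and change != -1:
--             if a[change]!=b[i] or b[change]!=a[i]:
--                 return False
--
--         if a[i] != b[i] and change == -1:
--             change = i
--
--         if a[i] == b[i]:
--             count += 1
--
--     return len(a)-2 == count or len(a) == count
-- ===== SOURCE B (Python) =====
-- def solution(a, b):
--     diff = [i for i in range(len(a)) if a[i] != b[i]]
--     if len(diff) == 0: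
--         return True
--     if len(diff) == 2:
--         i, j = diff
--         return a[i] == b[j] and a[j] == b[i]
--     return False
-- ===== Notes on version B (the rewrite author's own statement) =====
-- stated objective: simpler
-- what changed: Replaces A's stateful single pass (running equal-count, first-diff sentinel index, per-element early returns and the final len(a)-2==count arithmetic) with collect-then-classify: build the list of differing indices, then dispatch on its length (0 -> True, 2 -> swap check, else False).
-- outside the precondition, e.g. on solution([2, 3, 5, 10, 1, 178], [0, 4]): A returns False, B raises IndexError
import Mathlib
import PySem

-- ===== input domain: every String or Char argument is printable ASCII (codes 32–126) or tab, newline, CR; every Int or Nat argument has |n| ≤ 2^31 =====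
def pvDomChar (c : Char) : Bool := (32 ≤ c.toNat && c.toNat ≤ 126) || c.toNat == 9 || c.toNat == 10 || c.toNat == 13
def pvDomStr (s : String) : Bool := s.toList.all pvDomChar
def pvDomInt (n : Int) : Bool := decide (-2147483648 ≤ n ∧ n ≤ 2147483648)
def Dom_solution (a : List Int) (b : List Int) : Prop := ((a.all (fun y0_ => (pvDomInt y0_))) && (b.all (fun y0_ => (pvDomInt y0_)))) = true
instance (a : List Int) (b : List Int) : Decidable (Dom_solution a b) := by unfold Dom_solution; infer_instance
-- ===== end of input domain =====

-- B replaces A's stateful single pass by collect-the-differing-indices then dispatch on their count (simpler decomposition).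

-- ===== PORT A =====
-- indexing a[i]/b[i]: Pre_ guarantees 0 ≤ i < length, where pyGetD _ _ 0 equals Python's indexing exactly
def solAloop (a : List Int) (b : List Int) : List Int → Int → Int → Bool
  | [], _, count =>
      (decide ((a.length : Int) - 2 = count) || decide ((a.length : Int) = count))
  | i :: rest, change, count =>
      let ai := PySem.List.pyGetD a i 0
      let bi := PySem.List.pyGetD b i 0
      if ai ≠ bi ∧ change ≠ -1 then
        if PySem.List.pyGetD a change 0 ≠ bi ∨ PySem.List.pyGetD b change 0 ≠ ai then
          false
        else
          solAloop a b rest change count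
      else if ai ≠ bi ∧ change = -1 then
        solAloop a b rest i count
      else
        solAloop a b rest change (count + 1)

def solution (a : List Int) (b : List Int) : Bool :=
  solAloop a b (PySem.List.pyRange 0 (a.length : Int) 1) (-1) 0

-- ===== PORT B =====
def solution_alt (a : List Int) (b : List Int) : Bool :=
  let diff := (PySem.List.pyRange 0 (a.length : Int) 1).filter
      (fun i => PySem.List.pyGetD a i 0 ≠ PySem.List.pyGetD b i 0)
  match diff with
  | [] => true
  | [i, j] =>
      decide (PySem.List.pyGetD a i 0 = PySem.List.pyGetD b j 0 ∧
              PySem.List.pyGetD a j 0 = PySem.List.pyGetD b i 0)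
  | _ => false

-- ===== PRECONDITION & SPEC =====
-- Pre_ excludes b shorter than a: there both A and B index b out of range (IndexError); A's early-return
-- sometimes returns False before reaching the bad index, an accident of its scan order that B (which always
-- collects all differing indices first) raises on, so the whole short-b region is excluded.
def Pre_solution (a : List Int) (b : List Int) : Prop := a.length ≤ b.length
instance (a : List Int) (b : List Int) : Decidable (Pre_solution a b) := by unfold Pre_solution; infer_instance
def pvWitness_solution : List Int × List Int := ([1, 2, 3], [3, 2, 1])

def Spec_solution (a : List Int) (b : List Int) (out : Bool) : Prop := out = solution_alt a b
instance (a : List Int) (b : List Int) (out : Bool) : Decidable (Spec_solution a b out) := by unfold Spec_solution; infer_instance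

-- ===== CLAIM (what is proved, stated in full; the proofs are below) =====
def Claim_equal_solution : Prop := ∀ (a : List Int) (b : List Int), Dom_solution a b → Pre_solution a b → Spec_solution a b (solution a b)

-- ===== LEMMAS AND PROOFS =====

-- what A's loop computes: the first differing index h, every later differing index must swap-match h,
-- and the final count test `cond`
def pvChk (a b : List Int) (h i : Int) : Bool :=
  decide (PySem.List.pyGetD a h 0 = PySem.List.pyGetD b i 0 ∧
          PySem.List.pyGetD b h 0 = PySem.List.pyGetD a i 0)

def pvClassify (a b : List Int) (D : List Int) (cond : Bool) : Bool :=
  match D with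
  | [] => cond
  | h :: t => if t.all (fun i => pvChk a b h i) then cond else false

def pvDiffP (a b : List Int) (i : Int) : Bool :=
  PySem.List.pyGetD a i 0 ≠ PySem.List.pyGetD b i 0

theorem solAloop_classify (a b : List Int) (l : List Int) (c count : Int) (hc : c ≠ -1) :
    solAloop a b l c count =
      pvClassify a b (c :: l.filter (pvDiffP a b))
        (decide ((a.length : Int) - 2 = count + (l.countP (fun i => !pvDiffP a b i) : Int)) ||
         decide ((a.length : Int) = count + (l.countP (fun i => !pvDiffP a b i) : Int))) := by
  induction l generalizing count with
  | nil => simp [solAloop, pvClassify]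
  | cons i rest ih =>
    by_cases hd : pvDiffP a b i = true
    · have hne : PySem.List.pyGetD a i 0 ≠ PySem.List.pyGetD b i 0 := by
        simpa [pvDiffP] using hd
      by_cases hchk : pvChk a b c i = true
      · have hpass : ¬ (PySem.List.pyGetD a c 0 ≠ PySem.List.pyGetD b i 0 ∨
            PySem.List.pyGetD b c 0 ≠ PySem.List.pyGetD a i 0) := by
          simp only [pvChk, decide_eq_true_eq] at hchk
          push_neg
          exact hchk
        simp only [solAloop]
        rw [if_pos ⟨hne, hc⟩, if_neg hpass, ih]
        simp [pvClassify, List.filter_cons, hd, List.countP_cons, hchk]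
      · simp only [solAloop]
        rw [if_pos ⟨hne, hc⟩, if_pos]
        · simp [pvClassify, List.filter_cons, hd, hchk]
        · simp only [pvChk, decide_eq_true_eq] at hchk
          push_neg at hchk
          rcases Decidable.em (PySem.List.pyGetD a c 0 = PySem.List.pyGetD b i 0) with h1 | h1
          · exact Or.inr (hchk h1)
          · exact Or.inl h1
    · have heq : PySem.List.pyGetD a i 0 = PySem.List.pyGetD b i 0 := by
        simpa [pvDiffP] using hd
      simp only [solAloop]
      rw [if_neg (by simp [heq]), if_neg (by simp [heq]), ih]
      have hd' : pvDiffP a b i = false := by simpa using hd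
      have hco : (count + 1) + ((rest.countP (fun i => !pvDiffP a b i)) : Int)
           = count + (((i :: rest).countP (fun i => !pvDiffP a b i)) : Int) := by
        simp only [List.countP_cons, hd', Bool.not_false, if_pos rfl]
        push_cast
        ring
      simp [List.filter_cons, hd, hco]

theorem solAloop_start (a b : List Int) (l : List Int)
    (hl : ∀ x ∈ l, (0 : Int) ≤ x) (count : Int) :
    solAloop a b l (-1) count =
      pvClassify a b (l.filter (pvDiffP a b))
        (decide ((a.length : Int) - 2 = count + (l.countP (fun i => !pvDiffP a b i) : Int)) ||
         decide ((a.length : Int) = count + (l.countP (fun i => !pvDiffP a b i) : Int))) := by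
  induction l generalizing count with
  | nil => simp [solAloop, pvClassify]
  | cons i rest ih =>
    have hrest : ∀ x ∈ rest, (0 : Int) ≤ x := fun x hx => hl x (List.mem_cons_of_mem _ hx)
    by_cases hd : pvDiffP a b i = true
    · have hne : PySem.List.pyGetD a i 0 ≠ PySem.List.pyGetD b i 0 := by
        simpa [pvDiffP] using hd
      have hi1 : i ≠ (-1 : Int) := by
        have := hl i (List.mem_cons_self ..)
        omega
      simp only [solAloop]
      rw [if_neg (by simp), if_pos ⟨hne, by simp⟩, solAloop_classify a b rest i count hi1]
      simp [List.filter_cons, hd]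
    · have heq : PySem.List.pyGetD a i 0 = PySem.List.pyGetD b i 0 := by
        simpa [pvDiffP] using hd
      simp only [solAloop]
      rw [if_neg (by simp [heq]), if_neg (by simp [heq]), ih hrest]
      have hd' : pvDiffP a b i = false := by simpa using hd
      have hco : (count + 1) + ((rest.countP (fun i => !pvDiffP a b i)) : Int)
           = count + (((i :: rest).countP (fun i => !pvDiffP a b i)) : Int) := by
        simp only [List.countP_cons, hd', Bool.not_false, if_pos rfl]
        push_cast
        ring
      simp [List.filter_cons, hd, hco]

theorem pvPartition (p : Int → Bool) (l : List Int) :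
    (l.filter p).length + l.countP (fun i => !p i) = l.length := by
  induction l with
  | nil => simp
  | cons x xs ih =>
    by_cases hx : p x = true <;> simp [List.filter_cons, List.countP_cons, hx, ← ih] <;> omega

-- ===== VERDICT (by name: the statement is the Claim_ definition above) =====
theorem solution_spec : Claim_equal_solution := by
  intro a b _ _
  unfold Spec_solution solution solution_alt
  rw [solAloop_start a b _ (fun x hx => by
        have := (PySem.List.mem_pyRange_one).mp hx; omega) 0]
  have hlen : (PySem.List.pyRange 0 (a.length : Int) 1).length = a.length := by
    simp [PySem.List.length_pyRange_one]
  have hpart := pvPartition (pvDiffP a b) (PySem.List.pyRange 0 (a.length : Int) 1)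
  rw [hlen] at hpart
  set l := PySem.List.pyRange 0 (a.length : Int) 1 with hldef
  have hfil : (l.filter (fun i => decide (PySem.List.pyGetD a i 0 ≠ PySem.List.pyGetD b i 0)))
      = l.filter (pvDiffP a b) := by
    apply List.filter_congr
    intro x _
    simp [pvDiffP]
  simp only [hfil]
  set cnt := l.countP (fun i => !pvDiffP a b i) with hcnt
  rcases hD : l.filter (pvDiffP a b) with _ | ⟨i, D1⟩
  · -- no differing index
    rw [hD] at hpart
    simp only [pvClassify]
    have h0 : cnt = a.length := by simpa using hpart
    simp [h0]
  · rcases D1 with _ | ⟨j, D2⟩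
    · -- exactly one differing index
      rw [hD] at hpart
      have h1 : 1 + cnt = a.length := by simpa using hpart
      have hc1 : ¬ ((a.length : Int) - 2 = 0 + (cnt : Int)) := by omega
      have hc2 : ¬ ((a.length : Int) = 0 + (cnt : Int)) := by omega
      simp [pvClassify]
      omega
    · rcases D2 with _ | ⟨k, D3⟩
      · -- exactly two differing indices
        rw [hD] at hpart
        have h2 : 2 + cnt = a.length := by simpa using hpart
        have hcond : ((a.length : Int) - 2 = 0 + (cnt : Int)) := by omega
        simp only [pvClassify, List.all_cons, List.all_nil, Bool.and_true]
        by_cases hc : pvChk a b i j = true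
        · rw [if_pos hc]
          simp only [pvChk, decide_eq_true_eq] at hc
          simp [hcond, hc.1, hc.2.symm]
        · have hc' : pvChk a b i j = false := by simpa using hc
          rw [hc']
          simp only [Bool.false_eq_true, if_false]
          symm
          simp only [decide_eq_false_iff_not, not_and_or]
          simp only [pvChk, decide_eq_true_eq, not_and_or] at hc
          rcases hc with h | h
          · exact Or.inl h
          · exact Or.inr (fun he => h he.symm)
      · -- three or more differing indices
        rw [hD] at hpart
        have h3 : (D3.length + 3) + cnt = a.length := by
          simpa [add_comm, add_left_comm, add_assoc] using hpart
        have hc1 : ¬ ((a.length : Int) - 2 = 0 + (cnt : Int)) := by omega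
        have hc2 : ¬ ((a.length : Int) = 0 + (cnt : Int)) := by omega
        simp [pvClassify]
        intros
        omega
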